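-- pv_equiv track=rewrite | github.com/DmitryBalakin54/Itmo | programs/term3/MathLog/C/main.py | get_op_and_opnds
-- ===== SOURCE A (Python) =====
-- symbs = {0: '(',
--          1: '->',
--          2: ')',
--          3: '->(',
--          4: '))->',
--          5: ')->',
--          6: '!',
--          7: '&',
--          8: '|',
--          9: '(!,',
--          10: '(&,',
--          11: '(|,',
--          12: '(->,',
--          13: '|-',
--          14: '#',
--          15: ','}
--
-- def get_op_and_opnds(st):
--     op = st[1:st.find(symbs[15])]
--     if op == symbs[6]:
--         return op, st[st.find(symbs[15]) + 1: len(st) - 1], '', 1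
--     opnd1, cnt_commas, balance, ind = '', 0 , 0, st.find(symbs[15]) + 1
--     while balance != 0 or cnt_commas == 0:
--         sym = st[ind]
--         opnd1 += sym
--         if sym == symbs[0]:
--             balance += 1
--         elif sym == symbs[2]:
--             balance -= 1
--         elif sym == symbs[15]:
--             cnt_commas += 1
--         ind += 1
--     if st[ind] != symbs[15]:
--         ind -= 1
--         opnd1 = opnd1[:len(opnd1) - 1]
--     opnd2 = st[ind + 1:len(st) - 1]
--     return op, opnd1, opnd2, 2
-- ===== SOURCE B (Python) =====
-- def get_op_and_opnds(st):
--     c = st.find(',')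
--     op = st[1:c]
--     if op == '!':
--         return op, st[c + 1:len(st) - 1], '', 1
--     start = c + 1
--     if st[start:start + 1] == '(':
--         # parenthesized first operand: jump to its matching close paren
--         depth, e = 1, start + 1
--         while depth != 0:
--             sym = st[e]
--             if sym == '(':
--                 depth += 1
--             elif sym == ')':
--                 depth -= 1
--             e += 1
--         e -= 1  # index of the matching ')'
--         return op, st[start:e + 1], st[e + 2:len(st) - 1], 2
--     # plain first operand: it ends at the next comma (which must exist)
--     j = st.index(',', start)
--     return op, st[start:j], st[j + 1:len(st) - 1], 2
-- ===== Notes on version B (the rewrite author's own statement) =====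
-- stated objective: simpler
-- what changed: A's single unified while-loop that accumulates the first operand character by character while tracking both a paren balance and a comma count (and then un-does one character when it overshot past a comma) is replaced by a direct case split: locate the operator with find, then if the first operand is parenthesized jump to its matching close paren, otherwise take everything up to the separating comma, and slice both operands out of the string.
-- outside the precondition, e.g. on get_op_and_opnds(',,,'): A returns ('', ',', '', 2), B returns ('', '', '', 2); on get_op_and_opnds('(&,a(b,c),e)'): A returns ('&', 'a(b,c)', 'e', 2), B returns ('&', 'a(b', 'c),e', 2); on get_op_and_opnds(','): A raises IndexError, B raises ValueError
import Mathlib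
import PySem

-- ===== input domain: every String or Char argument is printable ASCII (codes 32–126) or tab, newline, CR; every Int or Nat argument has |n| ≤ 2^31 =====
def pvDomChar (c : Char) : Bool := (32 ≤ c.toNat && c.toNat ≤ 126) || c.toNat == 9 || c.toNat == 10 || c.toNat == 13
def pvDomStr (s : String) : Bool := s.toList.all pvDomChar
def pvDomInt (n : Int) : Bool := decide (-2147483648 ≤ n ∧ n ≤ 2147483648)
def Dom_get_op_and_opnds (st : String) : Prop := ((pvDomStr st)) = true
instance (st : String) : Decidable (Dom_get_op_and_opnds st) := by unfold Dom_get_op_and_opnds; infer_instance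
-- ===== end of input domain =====

-- B replaces A's unified balance+comma-count accumulation loop (with its overshoot-and-strip
-- correction) by a direct case split on whether the first operand is parenthesized, slicing the
-- operands out of the string; objective: simpler.

-- ===== PORT A =====
-- the while loop of A: walks from index ind accumulating opnd1, a comma count and a paren balance;
-- third component false = the scan ran past the end of the string (Python IndexError).
def aLoop (l : List Char) (opnd1 : List Char) (cnt balance : Int) (ind : Nat) :
    Nat → List Char × Nat × Bool
  | 0 => (opnd1, ind, false)        -- fuel exhausted; unreachable from the top-level call
  | fuel + 1 =>
    if balance ≠ 0 ∨ cnt = 0 then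
      if h : ind < l.length then
        let sym := l[ind]
        aLoop l (opnd1 ++ [sym])
          (if sym = '(' then cnt else if sym = ')' then cnt else if sym = ',' then cnt + 1 else cnt)
          (if sym = '(' then balance + 1 else if sym = ')' then balance - 1 else balance)
          (ind + 1) fuel
      else (opnd1, ind, false)
    else (opnd1, ind, true)

def get_op_and_opnds (st : String) : String × String × String × Int :=
  let l := st.toList
  let op := PySem.List.slice l (some 1) (some (PySem.Chars.find l [',']))
  if op = ['!'] then
    (String.ofList op,
     String.ofList (PySem.List.slice l (some (PySem.Chars.find l [','] + 1)) (some ((l.length : Int) - 1))),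
     "", 1)
  else
    -- ind = st.find(',') + 1 is ≥ 0, so the Nat cast is exact
    match aLoop l [] 0 0 (PySem.Chars.find l [','] + 1).toNat (l.length + 1) with
    | (opnd1, ind, ok) =>
      if ok then
        match PySem.List.pyGet? l (ind : Int) with
        | some sym =>
          if sym ≠ ',' then
            (String.ofList op,
             String.ofList (PySem.List.slice opnd1 none (some ((opnd1.length : Int) - 1))),
             String.ofList (PySem.List.slice l (some (ind : Int)) (some ((l.length : Int) - 1))), 2)
          else
            (String.ofList op, String.ofList opnd1,
             String.ofList (PySem.List.slice l (some ((ind : Int) + 1)) (some ((l.length : Int) - 1))), 2)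
        | none => ("", "", "", 0)   -- Python raises IndexError here
      else ("", "", "", 0)          -- Python raises IndexError inside the loop

-- ===== PORT B =====
-- B's matching-close-paren scan: depth from start+1; none = ran past the end (IndexError).
def bScan (l : List Char) (depth : Int) (e : Nat) : Nat → Option Nat
  | 0 => none                       -- fuel exhausted; unreachable from the top-level call
  | fuel + 1 =>
    if depth ≠ 0 then
      if h : e < l.length then
        let sym := l[e]
        bScan l (if sym = '(' then depth + 1 else if sym = ')' then depth - 1 else depth)
          (e + 1) fuel
      else none
    else some e

def get_op_and_opnds_alt (st : String) : String × String × String × Int :=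
  let l := st.toList
  let c := PySem.Chars.find l [',']
  let op := PySem.List.slice l (some 1) (some c)
  if op = ['!'] then
    (String.ofList op,
     String.ofList (PySem.List.slice l (some (c + 1)) (some ((l.length : Int) - 1))), "", 1)
  else
    let start := c + 1
    if PySem.List.slice l (some start) (some (start + 1)) = ['('] then
      -- start + 1 ≥ 0, so the Nat cast is exact
      match bScan l 1 (start + 1).toNat (l.length + 1) with
      | some e =>
        let e' := (e : Int) - 1
        (String.ofList op,
         String.ofList (PySem.List.slice l (some start) (some (e' + 1))),
         String.ofList (PySem.List.slice l (some (e' + 2)) (some ((l.length : Int) - 1))), 2)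
      | none => ("", "", "", 0)     -- Python raises IndexError here
    else
      let j := PySem.Chars.findFrom l [','] start none
      if j = -1 then ("", "", "", 0)  -- st.index raises ValueError in Python here
      else
        (String.ofList op,
         String.ofList (PySem.List.slice l (some start) (some j)),
         String.ofList (PySem.List.slice l (some (j + 1)) (some ((l.length : Int) - 1))), 2)

-- ===== PRECONDITION & SPEC =====
def pvDelta (ch : Char) : Int := if ch = '(' then 1 else if ch = ')' then -1 else 0
def pvDepth (l : List Char) : Int := (l.map pvDelta).sum

-- Pre_ excludes malformed inputs, i.e. strings that are not an application of an operator to one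
-- or two well-shaped comma-separated operands: there A either raises IndexError, or no particular
-- operand split is specified and A and B make different, equally defensible cuts of the garbage.
def Pre_get_op_and_opnds (st : String) : Prop :=
  let l := st.toList
  let c := PySem.Chars.find l [',']
  PySem.List.slice l (some 1) (some c) = ['!']
  ∨ (0 ≤ c ∧
      (let s := c.toNat + 1
       (∃ j < l.length, s ≤ j ∧ l[j]? = some ',' ∧
          (∀ k < j, s ≤ k → l[k]? ≠ some ',') ∧
          l[s]? ≠ some '(' ∧
          pvDepth (l.take j) - pvDepth (l.take s) = 0 ∧
          j + 1 < l.length ∧ l[j+1]? ≠ some ',')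
       ∨
       (l[s]? = some '(' ∧
        ∃ e < l.length, s ≤ e ∧
          (∀ k ≤ e, s < k → 0 < pvDepth (l.take k) - pvDepth (l.take s)) ∧
          pvDepth (l.take (e+1)) - pvDepth (l.take s) = 0 ∧
          e + 1 < l.length ∧ l[e+1]? = some ',' ∧
          ((∃ k ≤ e, s ≤ k ∧ l[k]? = some ',') ∨ (e + 2 < l.length ∧ l[e+2]? ≠ some ',')))))

instance (st : String) : Decidable (Pre_get_op_and_opnds st) := by
  unfold Pre_get_op_and_opnds; infer_instance

def pvWitness_get_op_and_opnds : String := "(&,a,b)"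

def Spec_get_op_and_opnds (st : String) (out : String × String × String × Int) : Prop :=
  out = get_op_and_opnds_alt st
instance (st : String) (out : String × String × String × Int) :
    Decidable (Spec_get_op_and_opnds st out) := by unfold Spec_get_op_and_opnds; infer_instance

-- ===== CLAIM (what is proved, stated in full; the proofs are below) =====
def Claim_equal_get_op_and_opnds : Prop :=
  ∀ (st : String), Dom_get_op_and_opnds st → Pre_get_op_and_opnds st →
    Spec_get_op_and_opnds st (get_op_and_opnds st)

-- ===== LEMMAS AND PROOFS =====
-- basic facts about drop/getElem? used to step through both scans
theorem pvDropCons {l : List Char} {e : Nat} {x : Char} {t : List Char}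
    (h : l.drop e = x :: t) : e < l.length ∧ l[e]? = some x ∧ l.drop (e+1) = t := by
  have hlen : e < l.length := by
    by_contra hc
    rw [List.drop_eq_nil_of_le (by omega)] at h
    cases h
  refine ⟨hlen, ?_, ?_⟩
  · have h0 : (l.drop e)[0]? = some x := by rw [h]; rfl
    simpa using h0
  · have : l.drop (e+1) = (l.drop e).drop 1 := by
      rw [List.drop_drop]
    simp [this, h]

theorem pvGetElemOfDropCons {l : List Char} {e : Nat} {x : Char} {t : List Char}
    (h : l.drop e = x :: t) (he : e < l.length) : l[e] = x := by
  have h2 := (pvDropCons h).2.1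
  rw [List.getElem?_eq_some_iff] at h2
  exact h2.2

theorem pvALoopStep (l acc : List Char) (cnt bal : Int) (e : Nat) (x : Char) (t : List Char)
    (fuel : Nat) (hd : l.drop e = x :: t) (hcond : bal ≠ 0 ∨ cnt = 0) :
    aLoop l acc cnt bal e (fuel + 1) =
      aLoop l (acc ++ [x])
        (if x = '(' then cnt else if x = ')' then cnt else if x = ',' then cnt + 1 else cnt)
        (if x = '(' then bal + 1 else if x = ')' then bal - 1 else bal)
        (e + 1) fuel := by
  have h1 := (pvDropCons hd).1
  have hx : l[e] = x := pvGetElemOfDropCons hd h1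
  rw [aLoop, if_pos hcond, dif_pos h1]
  simp only [hx]

theorem pvALoopExit (l acc : List Char) (cnt bal : Int) (e fuel : Nat)
    (hcond : ¬(bal ≠ 0 ∨ cnt = 0)) :
    aLoop l acc cnt bal e (fuel + 1) = (acc, e, true) := by
  rw [aLoop, if_neg hcond]

theorem pvBScanStep (l : List Char) (bal : Int) (e : Nat) (x : Char) (t : List Char)
    (fuel : Nat) (hd : l.drop e = x :: t) (hb : bal ≠ 0) :
    bScan l bal e (fuel + 1) =
      bScan l (if x = '(' then bal + 1 else if x = ')' then bal - 1 else bal) (e + 1) fuel := by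
  have h1 := (pvDropCons hd).1
  have hx : l[e] = x := pvGetElemOfDropCons hd h1
  rw [bScan, if_pos hb, dif_pos h1]
  simp only [hx]

theorem pvBScanExit (l : List Char) (e fuel : Nat) :
    bScan l 0 e (fuel + 1) = some e := by
  simp [bScan]

theorem pvDepth_append (a b : List Char) : pvDepth (a ++ b) = pvDepth a + pvDepth b := by
  simp [pvDepth]

theorem pvDepth_cons (x : Char) (a : List Char) : pvDepth (x :: a) = pvDelta x + pvDepth a := by
  simp [pvDepth, pvDelta]

theorem pvDepthTake (l : List Char) (s m : Nat) :
    pvDepth ((l.drop s).take m) = pvDepth (l.take (s + m)) - pvDepth (l.take s) := by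
  have h : l.take (s + m) = l.take s ++ (l.drop s).take m := List.take_add
  rw [h, pvDepth_append]
  ring
-- A's loop over a paren-free comma-free operand followed by a comma: it consumes the operand
-- and the comma and stops.
theorem pvAFlat (l : List Char) (o1 : List Char) (hok : ',' ∉ o1) :
    ∀ (acc : List Char) (bal : Int) (e fuel : Nat) (rest : List Char),
      l.drop e = o1 ++ ',' :: rest → o1.length + 2 ≤ fuel → bal + pvDepth o1 = 0 →
      aLoop l acc 0 bal e fuel = (acc ++ o1 ++ [','], e + o1.length + 1, true) := by
  induction o1 with
  | nil =>
    intro acc bal e fuel rest hd hf hdep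
    have hb : bal = 0 := by simpa [pvDepth] using hdep
    subst hb
    obtain ⟨f, rfl⟩ : ∃ f, fuel = (f + 1) + 1 := ⟨fuel - 2, by omega⟩
    rw [pvALoopStep l acc 0 0 e ',' rest (f + 1) (by simpa using hd) (Or.inr rfl)]
    have e1 : (if ',' = '(' then (0:Int) else if ',' = ')' then 0 else if ',' = ',' then 0 + 1 else 0) = 1 := by decide
    have e2 : (if ',' = '(' then (0:Int) + 1 else if ',' = ')' then 0 - 1 else 0) = 0 := by decide
    rw [e1, e2, pvALoopExit l (acc ++ [',']) 1 0 (e + 1) f (by norm_num)]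
    simp
  | cons ch o1 ih =>
    intro acc bal e fuel rest hd hf hdep
    have hc : ch ≠ ',' := fun h => hok (by simp [h])
    obtain ⟨f, rfl⟩ : ∃ f, fuel = f + 1 := ⟨fuel - 1, by omega⟩
    rw [pvALoopStep l acc 0 bal e ch (o1 ++ ',' :: rest) f (by simpa using hd) (Or.inr rfl)]
    have ecnt : (if ch = '(' then (0:Int) else if ch = ')' then 0
        else if ch = ',' then 0 + 1 else 0) = 0 := by
      by_cases h1 : ch = '(' <;> by_cases h2 : ch = ')' <;> simp [h1, h2, hc]
    have ebal : (if ch = '(' then bal + 1 else if ch = ')' then bal - 1 else bal)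
        = bal + pvDelta ch := by
      unfold pvDelta; split_ifs <;> omega
    rw [ecnt, ebal]
    have hdep' : (bal + pvDelta ch) + pvDepth o1 = 0 := by
      rw [pvDepth_cons] at hdep; omega
    rw [ih (fun h => hok (by simp [h])) (acc ++ [ch]) (bal + pvDelta ch) (e + 1) f rest
      (pvDropCons (by simpa using hd)).2.2 (by simp at hf ⊢; omega) hdep']
    simp
    omega

-- A's loop across a balanced group: it consumes the group, adding its commas to the count.
theorem pvAGroup (l : List Char) (seg : List Char) :
    ∀ (acc : List Char) (cnt bal : Int) (e fuel : Nat) (t : List Char),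
      l.drop e = seg ++ t →
      (∀ p, p <+: seg → p ≠ [] → p ≠ seg → 0 < bal + pvDepth p) →
      (seg ≠ [] → (bal ≠ 0 ∨ cnt = 0)) →
      bal + pvDepth seg = 0 →
      seg.length ≤ fuel →
      aLoop l acc cnt bal e fuel =
        aLoop l (acc ++ seg) (cnt + (seg.count ',' : Int)) 0 (e + seg.length)
          (fuel - seg.length) := by
  induction seg with
  | nil =>
    intro acc cnt bal e fuel t _ _ _ hdep _
    have hb : bal = 0 := by simpa [pvDepth] using hdep
    simp [hb]
  | cons s tl ih =>
    intro acc cnt bal e fuel t hd hpre hcond hdep hf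
    obtain ⟨f, rfl⟩ : ∃ f, fuel = f + 1 := ⟨fuel - 1, by simp at hf; omega⟩
    rw [pvALoopStep l acc cnt bal e s (tl ++ t) f (by simpa using hd) (hcond (by simp))]
    have hstep_bal : (if s = '(' then bal + 1 else if s = ')' then bal - 1 else bal)
        = bal + pvDelta s := by
      unfold pvDelta; split_ifs <;> omega
    have hstep_cnt : (if s = '(' then cnt else if s = ')' then cnt
        else if s = ',' then cnt + 1 else cnt) = cnt + (if s = ',' then 1 else 0) := by
      by_cases h1 : s = '(' <;> by_cases h2 : s = ')' <;> by_cases h3 : s = ',' <;>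
        simp [h1, h2, h3]
    rw [hstep_bal, hstep_cnt]
    have hdrop1 : l.drop (e + 1) = tl ++ t := (pvDropCons (by simpa using hd)).2.2
    have hdep' : (bal + pvDelta s) + pvDepth tl = 0 := by
      rw [pvDepth_cons] at hdep; omega
    have hpre' : ∀ p, p <+: tl → p ≠ [] → p ≠ tl → 0 < (bal + pvDelta s) + pvDepth p := by
      intro p hp hne hnetl
      have h := hpre (s :: p) (List.cons_prefix_cons.mpr ⟨rfl, hp⟩) (by simp)
        (by simp [hnetl])
      rw [pvDepth_cons] at h; omega
    have hcond' : tl ≠ [] → ((bal + pvDelta s) ≠ 0 ∨ cnt + (if s = ',' then 1 else 0) = 0) := by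
      intro htl
      left
      have hne : ([s] : List Char) ≠ s :: tl := by
        intro h
        apply htl
        injection h with _ h2
        exact h2.symm
      have h := hpre [s] ⟨tl, rfl⟩ (by simp) hne
      rw [pvDepth_cons] at h
      simp [pvDepth] at h
      omega
    rw [ih (acc ++ [s]) (cnt + (if s = ',' then 1 else 0)) (bal + pvDelta s) (e + 1) f t
      hdrop1 hpre' hcond' hdep' (by simp at hf; omega)]
    have h1 : acc ++ [s] ++ tl = acc ++ s :: tl := by simp
    have h2 : cnt + (if s = ',' then 1 else 0) + (tl.count ',' : Int)
        = cnt + ((s :: tl).count ',' : Int) := by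
      by_cases h : s = ',' <;> simp [h, List.count_cons] <;> push_cast <;> ring
    have h3 : e + 1 + tl.length = e + (s :: tl).length := by simp; omega
    have h4 : f - tl.length = (f + 1) - (s :: tl).length := by simp
    rw [h1, h2, h3, h4]

-- B's matching-paren scan across a balanced group.
theorem pvBGroup (l : List Char) (seg : List Char) :
    ∀ (bal : Int) (e fuel : Nat) (t : List Char),
      l.drop e = seg ++ t →
      (∀ p, p <+: seg → p ≠ seg → 0 < bal + pvDepth p) →
      bal + pvDepth seg = 0 →
      seg.length < fuel →
      bScan l bal e fuel = some (e + seg.length) := by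
  induction seg with
  | nil =>
    intro bal e fuel t _ _ hdep hf
    have hb : bal = 0 := by simpa [pvDepth] using hdep
    obtain ⟨f, rfl⟩ : ∃ f, fuel = f + 1 := ⟨fuel - 1, by omega⟩
    subst hb
    simp [pvBScanExit]
  | cons s tl ih =>
    intro bal e fuel t hd hpre hdep hf
    obtain ⟨f, rfl⟩ : ∃ f, fuel = f + 1 := ⟨fuel - 1, by omega⟩
    have hb : bal ≠ 0 := by
      have h := hpre [] (by simp) (by simp)
      simp [pvDepth] at h
      omega
    rw [pvBScanStep l bal e s (tl ++ t) f (by simpa using hd) hb]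
    have hstep_bal : (if s = '(' then bal + 1 else if s = ')' then bal - 1 else bal)
        = bal + pvDelta s := by
      unfold pvDelta; split_ifs <;> omega
    rw [hstep_bal]
    have hdrop1 : l.drop (e + 1) = tl ++ t := (pvDropCons (by simpa using hd)).2.2
    have hdep' : (bal + pvDelta s) + pvDepth tl = 0 := by
      rw [pvDepth_cons] at hdep; omega
    have hpre' : ∀ p, p <+: tl → p ≠ tl → 0 < (bal + pvDelta s) + pvDepth p := by
      intro p hp hnetl
      have h := hpre (s :: p) (List.cons_prefix_cons.mpr ⟨rfl, hp⟩) (by simp [hnetl])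
      rw [pvDepth_cons] at h; omega
    rw [ih (bal + pvDelta s) (e + 1) f t hdrop1 hpre' hdep' (by simp at hf; omega)]
    simp
    omega
theorem pvPrefixSingleton (l : List Char) (a : Char) (i : Nat) :
    [a] <+: l.drop i ↔ l[i]? = some a := by
  constructor
  · rintro ⟨t, ht⟩
    have h0 : (l.drop i)[0]? = some a := by rw [← ht]; rfl
    simpa using h0
  · intro h
    have hi : i < l.length := (List.getElem?_eq_some_iff.mp h).1
    have hx : l[i] = a := (List.getElem?_eq_some_iff.mp h).2
    have : l.drop i = a :: l.drop (i + 1) := by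
      rw [List.drop_eq_getElem_cons hi, hx]
    exact this ▸ ⟨l.drop (i + 1), rfl⟩

-- Python st.find(',') returns the index of the first comma.
theorem pvFindCharEq (l : List Char) (j : Nat) (hj : l[j]? = some ',')
    (hmin : ∀ k < j, l[k]? ≠ some ',') : PySem.Chars.find l [','] = j := by
  have hpre : [','] <+: l.drop j := (pvPrefixSingleton l ',' j).mpr hj
  have hinf : [','] <:+: l := by
    obtain ⟨t, ht⟩ := hpre
    exact ⟨l.take j, t, by rw [List.append_assoc, ht, List.take_append_drop]⟩
  have h0 : 0 ≤ PySem.Chars.find l [','] := (PySem.Chars.find_nonneg_iff l [',']).mpr hinf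
  obtain ⟨hat, hlt⟩ := PySem.Chars.find_spec h0
  have hat' : l[(PySem.Chars.find l [',']).toNat]? = some ',' :=
    (pvPrefixSingleton l ',' _).mp hat
  have heq : (PySem.Chars.find l [',']).toNat = j := by
    by_contra hne
    rcases Nat.lt_or_ge (PySem.Chars.find l [',']).toNat j with h | h
    · exact hmin _ h hat'
    · exact hlt j (by omega) hpre
  omega
theorem pvMainUnparen (st : String) (cn j : Nat)
    (hfind : PySem.Chars.find st.toList [','] = (cn : Int))
    (hj : j < st.toList.length) (hsj : cn + 1 ≤ j)
    (hcomma : st.toList[j]? = some ',')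
    (hmin : ∀ k < j, cn + 1 ≤ k → st.toList[k]? ≠ some ',')
    (hhead : st.toList[cn+1]? ≠ some '(')
    (hdepj : pvDepth (st.toList.take j) - pvDepth (st.toList.take (cn+1)) = 0)
    (hj1 : j + 1 < st.toList.length) (hnc : st.toList[j+1]? ≠ some ',')
    (hop : ¬ PySem.List.slice st.toList (some 1) (some (PySem.Chars.find st.toList [','])) = ['!']) :
    get_op_and_opnds st = get_op_and_opnds_alt st := by
  set l := st.toList with hl
  set s : Nat := cn + 1 with hs
  set o1 : List Char := (l.drop s).take (j - s) with ho1def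
  have ho1len : o1.length = j - s := by
    rw [ho1def, List.length_take, List.length_drop]; omega
  have hcj : l[j] = ',' := (List.getElem?_eq_some_iff.mp hcomma).2
  have hdropj : l.drop j = ',' :: l.drop (j + 1) := by
    rw [List.drop_eq_getElem_cons hj, hcj]
  have hsplit : l.drop s = o1 ++ ',' :: l.drop (j + 1) := by
    rw [← hdropj, ho1def]
    have h2 : l.drop j = (l.drop s).drop (j - s) := by rw [List.drop_drop]; congr 1; omega
    rw [h2, List.take_append_drop]
  have hmem : ∀ ch ∈ o1, ch ≠ ',' := by
    intro ch hch
    obtain ⟨i, hgi⟩ := List.mem_iff_getElem?.mp hch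
    have hilt : i < j - s := by
      by_contra hge
      rw [ho1def, List.getElem?_take] at hgi
      simp [if_neg (by omega : ¬ i < j - s)] at hgi
    have hli : l[s + i]? = some ch := by
      rw [ho1def, List.getElem?_take, if_pos hilt, List.getElem?_drop] at hgi
      exact hgi
    intro h
    subst h
    exact hmin (s + i) (by omega) (by omega) hli
  have hnotin : ',' ∉ o1 := fun h => (hmem ',' h) rfl
  have hdepo1 : (0:Int) + pvDepth o1 = 0 := by
    rw [ho1def]
    have h5 : s + (j - s) = j := by omega
    rw [pvDepthTake, h5]
    omega
  have htoNat : (PySem.Chars.find l [','] + 1).toNat = s := by rw [hfind]; omega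
  have hA := pvAFlat l o1 hnotin [] 0 s (l.length + 1) (l.drop (j + 1)) hsplit
    (by rw [ho1len]; omega) hdepo1
  have hind : s + o1.length + 1 = j + 1 := by rw [ho1len]; omega
  rw [hind] at hA
  have hsym : l[j+1] ≠ ',' := by
    intro h
    exact hnc (by rw [List.getElem?_eq_getElem hj1, h])
  have hAval : get_op_and_opnds st =
      (String.ofList (PySem.List.slice l (some 1) (some (PySem.Chars.find l [',']))),
       String.ofList o1,
       String.ofList (PySem.List.slice l (some ((j : Int) + 1)) (some ((l.length : Int) - 1))),
       2) := by
    unfold get_op_and_opnds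
    rw [← hl, if_neg hop, htoNat, hA]
    simp only [List.nil_append]
    have hlen1 : ((o1 ++ [','] : List Char).length : Int) - 1 = (o1.length : Int) := by
      simp
    rw [hlen1]
    have hstrip : PySem.List.slice (o1 ++ [',']) none (some (o1.length : Int)) = o1 := by
      rw [PySem.List.slice_to_natCast]
      exact List.take_left
    have hget : PySem.List.pyGet? l ((j + 1 : Nat) : Int) = some l[j+1] := by
      rw [PySem.List.pyGet?_natCast, List.getElem?_eq_getElem hj1]
    rw [hget]
    simp only [if_pos hsym, hstrip]
    have hc2 : ((j + 1 : Nat) : Int) = (j : Int) + 1 := by push_cast; ring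
    rw [hc2]
    simp
  have hBval : get_op_and_opnds_alt st =
      (String.ofList (PySem.List.slice l (some 1) (some (PySem.Chars.find l [',']))),
       String.ofList o1,
       String.ofList (PySem.List.slice l (some ((j : Int) + 1)) (some ((l.length : Int) - 1))),
       2) := by
    unfold get_op_and_opnds_alt
    rw [← hl, if_neg hop]
    have hcast : PySem.Chars.find l [','] + 1 = ((s : Nat) : Int) := by
      rw [hfind, hs]; push_cast; ring
    have hguard : PySem.List.slice l (some (PySem.Chars.find l [','] + 1))
        (some (PySem.Chars.find l [','] + 1 + 1)) ≠ ['('] := by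
      rw [hcast]
      have h1 : ((s : Nat) : Int) + 1 = ((s + 1 : Nat) : Int) := by push_cast; ring
      rw [h1, PySem.List.slice_natCast]
      have h2 : s + 1 - s = 1 := by omega
      have hslen : s < l.length := by omega
      rw [h2, List.drop_eq_getElem_cons hslen]
      have hsne : l[s] ≠ '(' := by
        intro h4
        exact hhead (by rw [List.getElem?_eq_getElem hslen, h4])
      rw [show (1:Nat) = 0 + 1 from rfl, List.take_succ_cons, List.take_zero]
      intro hx
      exact hsne (by injection hx)
    rw [if_neg hguard]
    have hff : PySem.Chars.findFrom l [','] (PySem.Chars.find l [','] + 1) none = (j : Int) := by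
      rw [hcast, PySem.Chars.findFrom_natCast l [','] s (by omega)]
      have hfd : PySem.Chars.find (l.drop s) [','] = (o1.length : Int) := by
        apply pvFindCharEq
        · rw [hsplit, List.getElem?_append_right (by omega)]
          simp
        · intro k hk
          rw [hsplit, List.getElem?_append_left (by omega)]
          intro hsome
          have hkch := hmem (o1[k]'(by omega)) (by simp)
          rw [List.getElem?_eq_getElem (by omega : k < o1.length)] at hsome
          exact hkch (by injection hsome)
      rw [hfd, if_neg (by omega)]
      push_cast
      omega
    rw [hff, if_neg (show ¬((j : Int) = -1) by omega)]
    have hsl1 : PySem.List.slice l (some (PySem.Chars.find l [','] + 1)) (some (j : Int)) = o1 := by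
      rw [hcast, PySem.List.slice_natCast, ho1def]
    rw [hsl1]
  rw [hAval, hBval]
theorem pvMainParen (st : String) (cn em : Nat)
    (hfind : PySem.Chars.find st.toList [','] = (cn : Int))
    (hpo : st.toList[cn+1]? = some '(')
    (he : em < st.toList.length) (hse : cn + 1 ≤ em)
    (hpref : ∀ k ≤ em, cn + 1 < k →
      0 < pvDepth (st.toList.take k) - pvDepth (st.toList.take (cn+1)))
    (hdep0 : pvDepth (st.toList.take (em+1)) - pvDepth (st.toList.take (cn+1)) = 0)
    (he1 : em + 1 < st.toList.length) (hcm : st.toList[em+1]? = some ',')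
    (hlast : (∃ k ≤ em, cn + 1 ≤ k ∧ st.toList[k]? = some ',') ∨
      (em + 2 < st.toList.length ∧ st.toList[em+2]? ≠ some ','))
    (hop : ¬ PySem.List.slice st.toList (some 1) (some (PySem.Chars.find st.toList [','])) = ['!']) :
    get_op_and_opnds st = get_op_and_opnds_alt st := by
  set l := st.toList with hl
  set s : Nat := cn + 1 with hs
  set seg : List Char := (l.drop s).take (em + 1 - s) with hsegdef
  have hseglen : seg.length = em + 1 - s := by
    rw [hsegdef, List.length_take, List.length_drop]; omega
  have hsplit : l.drop s = seg ++ l.drop (em + 1) := by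
    rw [hsegdef]
    have h2 : l.drop (em + 1) = (l.drop s).drop (em + 1 - s) := by
      rw [List.drop_drop]; congr 1; omega
    rw [h2, List.take_append_drop]
  have htake_pref : ∀ p, p <+: seg → pvDepth p = pvDepth (l.take (s + p.length)) - pvDepth (l.take s) := by
    intro p hp
    have hlen : p.length ≤ em + 1 - s := by
      have := hp.length_le; omega
    have hpeq : p = (l.drop s).take p.length := by
      conv_lhs => rw [List.prefix_iff_eq_take.mp hp]
      rw [hsegdef, List.take_take, Nat.min_eq_left hlen]
    have h3 := pvDepthTake l s p.length
    rw [← hpeq] at h3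
    exact h3
  have haux : ∀ p, p <+: seg → p ≠ [] → p ≠ seg → 0 < pvDepth p := by
    intro p hp hne hnes
    have hlt : p.length < seg.length := by
      rcases Nat.lt_or_ge p.length seg.length with h | h
      · exact h
      · exact absurd (hp.eq_of_length (by have := hp.length_le; omega)) hnes
    have hge : 1 ≤ p.length := by
      cases p with
      | nil => exact absurd rfl hne
      | cons a b => simp
    rw [htake_pref p hp]
    exact hpref (s + p.length) (by omega) (by omega)
  have hsegne : seg ≠ [] := by
    apply List.ne_nil_of_length_pos
    omega
  have hdeps : pvDepth seg = 0 := by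
    have h0 := htake_pref seg (List.prefix_refl seg)
    rw [hseglen] at h0
    have h1 : s + (em + 1 - s) = em + 1 := by omega
    rw [h1] at h0
    omega
  have hAgroup := pvAGroup l seg [] 0 0 s (l.length + 1) (l.drop (em + 1)) hsplit
    (fun p hp h1 h2 => by simpa using haux p hp h1 h2)
    (fun _ => Or.inr rfl) (by simpa using hdeps) (by omega)
  have hsum : s + seg.length = em + 1 := by omega
  rw [hsum] at hAgroup
  have htoNat : (PySem.Chars.find l [','] + 1).toNat = s := by rw [hfind]; omega
  have hcommaIff : (',' ∈ seg) ↔ ∃ k, k ≤ em ∧ s ≤ k ∧ l[k]? = some ',' := by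
    constructor
    · intro hmem
      obtain ⟨i, hgi⟩ := List.mem_iff_getElem?.mp hmem
      have hilt : i < em + 1 - s := by
        by_contra hge
        rw [hsegdef, List.getElem?_take] at hgi
        simp [if_neg (by omega : ¬ i < em + 1 - s)] at hgi
      refine ⟨s + i, by omega, by omega, ?_⟩
      rw [hsegdef, List.getElem?_take, if_pos hilt, List.getElem?_drop] at hgi
      exact hgi
    · rintro ⟨k, hk1, hk2, hk3⟩
      apply List.mem_iff_getElem?.mpr
      refine ⟨k - s, ?_⟩
      rw [hsegdef, List.getElem?_take, if_pos (by omega), List.getElem?_drop]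
      rw [show s + (k - s) = k by omega]
      exact hk3
  -- B's side: identical in both cases
  have hslen : s < l.length := by omega
  have hlps : l[s] = '(' := (List.getElem?_eq_some_iff.mp hpo).2
  have hguard : PySem.List.slice l (some (PySem.Chars.find l [','] + 1))
      (some (PySem.Chars.find l [','] + 1 + 1)) = ['('] := by
    have hcast : PySem.Chars.find l [','] + 1 = ((s : Nat) : Int) := by
      rw [hfind, hs]; push_cast; ring
    have h1 : ((s : Nat) : Int) + 1 = ((s + 1 : Nat) : Int) := by push_cast; ring
    rw [hcast, h1, PySem.List.slice_natCast]
    rw [show s + 1 - s = 0 + 1 by omega, List.drop_eq_getElem_cons hslen,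
      List.take_succ_cons, List.take_zero, hlps]
  obtain ⟨mid, hmid⟩ : ∃ mid, seg = '(' :: mid := by
    cases hsege : seg with
    | nil => exact absurd hsege hsegne
    | cons a b =>
      refine ⟨b, ?_⟩
      have h0 : seg[0]? = some '(' := by
        rw [hsegdef, List.getElem?_take, if_pos (by omega), List.getElem?_drop]
        rw [show s + 0 = s by omega]
        exact hpo
      rw [hsege] at h0
      simp at h0
      rw [h0]
  have hmidlen : mid.length = em - s := by
    have := hseglen
    rw [hmid] at this
    simp at this
    omega
  have hdropmid : l.drop (s + 1) = mid ++ l.drop (em + 1) := by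
    have := hsplit
    rw [hmid] at this
    exact (pvDropCons (by simpa using this)).2.2
  have hmidpref : ∀ p, p <+: mid → p ≠ mid → 0 < 1 + pvDepth p := by
    intro p hp hne
    have h := haux ('(' :: p) (by rw [hmid]; exact List.cons_prefix_cons.mpr ⟨rfl, hp⟩)
      (by simp) (by rw [hmid]; simp [hne])
    rw [pvDepth_cons] at h
    have hd : pvDelta '(' = 1 := by decide
    omega
  have hmiddep : (1:Int) + pvDepth mid = 0 := by
    have := hdeps
    rw [hmid, pvDepth_cons] at this
    have hd : pvDelta '(' = 1 := by decide
    omega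
  have hB := pvBGroup l mid 1 (s + 1) (l.length + 1) (l.drop (em + 1)) hdropmid hmidpref
    hmiddep (by omega)
  have hsum2 : s + 1 + mid.length = em + 1 := by omega
  rw [hsum2] at hB
  have htoNat2 : (PySem.Chars.find l [','] + 1 + 1).toNat = s + 1 := by rw [hfind]; omega
  -- value of B
  have hBval : get_op_and_opnds_alt st =
      (String.ofList (PySem.List.slice l (some 1) (some (PySem.Chars.find l [',']))),
       String.ofList seg,
       String.ofList (PySem.List.slice l (some (((em + 1 : Nat) : Int) + 1)) (some ((l.length : Int) - 1))),
       2) := by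
    unfold get_op_and_opnds_alt
    rw [← hl, if_neg hop, if_pos hguard, htoNat2, hB]
    dsimp only
    have hc1 : ((em + 1 : Nat) : Int) - 1 + 1 = ((em + 1 : Nat) : Int) := by ring
    have hc2 : ((em + 1 : Nat) : Int) - 1 + 2 = ((em + 1 : Nat) : Int) + 1 := by ring
    rw [hc1, hc2]
    have hc3 : PySem.Chars.find l [','] + 1 = ((s : Nat) : Int) := by
      rw [hfind, hs]; push_cast; ring
    rw [hc3, PySem.List.slice_natCast, ← hsegdef]
  by_cases hcs : ',' ∈ seg
  · -- the group already contains a comma: A stops right at the closing paren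
    have hcN : seg.count ',' ≠ 0 := by
      have := List.count_pos_iff.mpr hcs
      omega
    obtain ⟨g, hg⟩ : ∃ g, l.length + 1 - seg.length = g + 1 := ⟨l.length - seg.length, by omega⟩
    rw [hg] at hAgroup
    have hexit := pvALoopExit l ([] ++ seg) (0 + (seg.count ',' : Int)) 0 (em + 1) g
      (by simp [hcN])
    rw [hexit] at hAgroup
    have hAval : get_op_and_opnds st =
        (String.ofList (PySem.List.slice l (some 1) (some (PySem.Chars.find l [',']))),
         String.ofList seg,
         String.ofList (PySem.List.slice l (some (((em + 1 : Nat) : Int) + 1)) (some ((l.length : Int) - 1))),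
         2) := by
      unfold get_op_and_opnds
      rw [← hl, if_neg hop, htoNat, hAgroup]
      simp only [List.nil_append]
      have hget : PySem.List.pyGet? l ((em + 1 : Nat) : Int) = some ',' := by
        rw [PySem.List.pyGet?_natCast]
        exact hcm
      rw [hget]
      simp
    rw [hAval, hBval]
  · -- no comma inside the group: A also eats the following comma, then strips it again
    have hcount0 : seg.count ',' = 0 := by
      simp [List.count_eq_zero]
      intro h
      exact hcs h
    rcases hlast with ⟨k, hk1, hk2, hk3⟩ | ⟨h2a, h2b⟩
    · exact absurd (hcommaIff.mpr ⟨k, hk1, hk2, hk3⟩) hcs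
    have hdropem1 : l.drop (em + 1) = ',' :: l.drop (em + 2) := by
      rw [List.drop_eq_getElem_cons he1, (List.getElem?_eq_some_iff.mp hcm).2]
    obtain ⟨g, hg⟩ : ∃ g, l.length + 1 - seg.length = (g + 1) + 1 :=
      ⟨l.length - seg.length - 1, by omega⟩
    rw [hg] at hAgroup
    have h01 : (0:Int) + ((seg.count ',' : Nat) : Int) = 0 := by rw [hcount0]; simp
    rw [h01] at hAgroup
    rw [pvALoopStep l ([] ++ seg) 0 0 (em + 1) ',' (l.drop (em + 2)) (g + 1)
      (by simpa using hdropem1) (Or.inr rfl)] at hAgroup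
    have e1 : (if ',' = '(' then (0:Int) else if ',' = ')' then 0
        else if ',' = ',' then 0 + 1 else 0) = 1 := by decide
    have e2 : (if ',' = '(' then (0:Int) + 1 else if ',' = ')' then 0 - 1 else 0) = 0 := by decide
    rw [e1, e2] at hAgroup
    rw [pvALoopExit l ([] ++ seg ++ [',']) 1 0 (em + 2) g (by norm_num)] at hAgroup
    have h2a' : em + 2 < l.length := h2a
    have hsym : l[em+2] ≠ ',' := by
      intro h
      exact h2b (by rw [List.getElem?_eq_getElem h2a', h])
    have hAval : get_op_and_opnds st =
        (String.ofList (PySem.List.slice l (some 1) (some (PySem.Chars.find l [',']))),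
         String.ofList seg,
         String.ofList (PySem.List.slice l (some (((em + 1 : Nat) : Int) + 1)) (some ((l.length : Int) - 1))),
         2) := by
      unfold get_op_and_opnds
      rw [← hl, if_neg hop, htoNat, hAgroup]
      simp only [List.nil_append]
      have hget : PySem.List.pyGet? l ((em + 2 : Nat) : Int) = some l[em+2] := by
        rw [PySem.List.pyGet?_natCast, List.getElem?_eq_getElem h2a']
      rw [hget]
      have hlen1 : (((seg ++ [','] : List Char)).length : Int) - 1 = (seg.length : Int) := by simp
      rw [hlen1]
      have hstrip : PySem.List.slice (seg ++ [',']) none (some (seg.length : Int)) = seg := by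
        rw [PySem.List.slice_to_natCast]
        exact List.take_left
      rw [hstrip]
      have hc2 : ((em + 2 : Nat) : Int) = ((em + 1 : Nat) : Int) + 1 := by push_cast; ring
      rw [hc2]
      simp [hsym]
    rw [hAval, hBval]

-- ===== VERDICT (by name: the statement is the Claim_ definition above) =====
theorem get_op_and_opnds_spec : Claim_equal_get_op_and_opnds := by
  intro st _hdom hpre
  unfold Spec_get_op_and_opnds
  by_cases hop : PySem.List.slice st.toList (some 1)
      (some (PySem.Chars.find st.toList [','])) = ['!']
  · simp only [get_op_and_opnds, get_op_and_opnds_alt, if_pos hop]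
  · simp only [Pre_get_op_and_opnds] at hpre
    rcases hpre with h | ⟨h0, hsh⟩
    · exact absurd h hop
    have hfind : PySem.Chars.find st.toList [','] =
        (((PySem.Chars.find st.toList [',']).toNat : Nat) : Int) := by omega
    rcases hsh with ⟨j, hjlen, hsj, hcomma, hmin, hhead, hdepj, hj1, hnc⟩ |
      ⟨hpo, e, helen, hse, hpref, hdep, he1, hcm, hlast⟩
    · exact pvMainUnparen st _ j hfind hjlen hsj hcomma hmin hhead hdepj hj1 hnc hop
    · exact pvMainParen st _ e hfind hpo helen hse hpref hdep he1 hcm hlast hop
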